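-- pv_equiv track=rewrite | github.com/sankarsai0/packet-analyzer | app.py | _highest_protocol
-- ===== SOURCE A (Python) =====
-- def _highest_protocol(chain: str) -> str:
--     """Pick the highest-level protocol from the tshark protocol chain string."""
--     priority = [
--         "http2", "http", "tls", "ssl",
--         "dns", "dhcp", "bootp",
--         "tcp", "udp", "icmp", "icmpv6",
--         "arp", "ipv6", "ip", "eth",
--     ]
--     parts = chain.lower().split(":")
--     for p in priority:
--         if p in parts:
--             return p.upper()
--     return parts[-1].upper() if parts else "UNKNOWN"
-- ===== SOURCE B (Python) =====
-- def _highest_protocol(chain: str) -> str: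
--     """Pick the highest-level protocol from the tshark protocol chain string."""
--     rank = {
--         "http2": 0, "http": 1, "tls": 2, "ssl": 3,
--         "dns": 4, "dhcp": 5, "bootp": 6,
--         "tcp": 7, "udp": 8, "icmp": 9, "icmpv6": 10,
--         "arp": 11, "ipv6": 12, "ip": 13, "eth": 14,
--     }
--     parts = chain.lower().split(":")
--     best = None  # (rank, part) with the smallest rank seen so far
--     for part in parts:
--         r = rank.get(part)
--         if r is not None and (best is None or r < best[0]):
--             best = (r, part)
--     if best is not None:
--         return best[1].upper()
--     return parts[-1].upper()  # split(":") never returns an empty list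
-- ===== Notes on version B (the rewrite author's own statement) =====
-- stated objective: alternative
-- what changed: Inverts the traversal: instead of scanning the priority list and testing membership in parts for each entry (a nested scan), B builds a rank index once and makes a single pass over the chain's parts keeping the part of minimum rank.
import Mathlib
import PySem

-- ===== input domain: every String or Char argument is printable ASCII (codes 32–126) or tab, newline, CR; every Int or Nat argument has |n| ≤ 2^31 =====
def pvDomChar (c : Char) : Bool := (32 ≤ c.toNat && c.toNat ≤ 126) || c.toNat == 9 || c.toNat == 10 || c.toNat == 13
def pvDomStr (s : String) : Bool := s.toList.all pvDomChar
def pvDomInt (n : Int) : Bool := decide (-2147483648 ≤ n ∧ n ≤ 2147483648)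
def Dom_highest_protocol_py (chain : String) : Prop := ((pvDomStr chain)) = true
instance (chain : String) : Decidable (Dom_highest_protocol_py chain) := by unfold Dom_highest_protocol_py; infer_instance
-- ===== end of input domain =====

-- B inverts the traversal: it builds a rank index of the priority list once and makes a single
-- pass over the chain's parts keeping the part of minimum rank (alternative decomposition, same result).


-- ===== PORT A =====
-- literal port of A: scan the priority list, return the first entry that occurs among the parts;
-- split(":") with the non-empty literal separator never raises, so the `.getD []` branch is unreachable.
def highest_protocol_py (chain : String) : String :=
  let priority : List String :=
    ["http2", "http", "tls", "ssl",
     "dns", "dhcp", "bootp",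
     "tcp", "udp", "icmp", "icmpv6",
     "arp", "ipv6", "ip", "eth"]
  let parts : List String := (PySem.Str.split? (PySem.Str.lower chain) ":").getD []
  match priority.find? (fun p => parts.contains p) with
  | some p => PySem.Str.upper p
  | none => if parts.isEmpty then "UNKNOWN" else PySem.Str.upper (PySem.List.pyGetD parts (-1) "")

-- ===== PORT B =====
-- literal port of B (Source B): rank dict from enumerate(priority), one fold over parts keeping the
-- minimum-rank part; parts[-1] is total here because split(":") never returns an empty list.
def highest_protocol_py_alt (chain : String) : String :=
  let rank : PySem.Dict String Int := PySem.Dict.ofList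
    [("http2", 0), ("http", 1), ("tls", 2), ("ssl", 3),
     ("dns", 4), ("dhcp", 5), ("bootp", 6),
     ("tcp", 7), ("udp", 8), ("icmp", 9), ("icmpv6", 10),
     ("arp", 11), ("ipv6", 12), ("ip", 13), ("eth", 14)]
  let parts : List String := (PySem.Str.split? (PySem.Str.lower chain) ":").getD []
  let best : Option (Int × String) := parts.foldl
    (fun best part =>
      match rank.get? part with
      | some r =>
        match best with
        | none => some (r, part)
        | some b => if r < b.1 then some (r, part) else best
      | none => best) none
  match best with
  | some b => PySem.Str.upper b.2
  | none => PySem.Str.upper (PySem.List.pyGetD parts (-1) "")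

-- ===== PRECONDITION & SPEC =====
def Spec_highest_protocol_py (chain : String) (out : String) : Prop := out = highest_protocol_py_alt chain
instance (chain : String) (out : String) : Decidable (Spec_highest_protocol_py chain out) := by unfold Spec_highest_protocol_py; infer_instance

-- ===== CLAIM (what is proved, stated in full; the proofs are below) =====
def Claim_equal_highest_protocol_py : Prop := ∀ (chain : String), Dom_highest_protocol_py chain → Spec_highest_protocol_py chain (highest_protocol_py chain)

-- ===== LEMMAS AND PROOFS =====

-- the priority list and the rank dict of the two ports, as proof-side names
def pvP : List String :=
  ["http2", "http", "tls", "ssl",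
   "dns", "dhcp", "bootp",
   "tcp", "udp", "icmp", "icmpv6",
   "arp", "ipv6", "ip", "eth"]

def pvRank : PySem.Dict String Int := PySem.Dict.ofList
  [("http2", 0), ("http", 1), ("tls", 2), ("ssl", 3),
   ("dns", 4), ("dhcp", 5), ("bootp", 6),
   ("tcp", 7), ("udp", 8), ("icmp", 9), ("icmpv6", 10),
   ("arp", 11), ("ipv6", 12), ("ip", 13), ("eth", 14)]

-- the step of B's fold, named
def pvStep (best : Option (Int × String)) (part : String) : Option (Int × String) :=
  match pvRank.get? part with
  | some r =>
    match best with
    | none => some (r, part)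
    | some b => if r < b.1 then some (r, part) else best
  | none => best

-- a rank lookup decodes into an index of pvP
set_option maxHeartbeats 2000000 in
lemma pvRank_decode (q : String) (r : Int) (h : pvRank.get? q = some r) :
    0 ≤ r ∧ r.toNat < pvP.length ∧ pvP[r.toNat]? = some q := by
  have hitems : pvRank.items =
      [("http2",(0:Int)),("http",1),("tls",2),("ssl",3),("dns",4),("dhcp",5),("bootp",6),
       ("tcp",7),("udp",8),("icmp",9),("icmpv6",10),("arp",11),("ipv6",12),("ip",13),("eth",14)] := by
    rfl
  have hmem := PySem.Dict.mem_items_of_get?_eq_some _ h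
  rw [hitems] at hmem
  simp only [List.mem_cons, List.not_mem_nil, or_false, Prod.mk.injEq] at hmem
  rcases hmem with ⟨rfl,rfl⟩|⟨rfl,rfl⟩|⟨rfl,rfl⟩|⟨rfl,rfl⟩|⟨rfl,rfl⟩|⟨rfl,rfl⟩|⟨rfl,rfl⟩|⟨rfl,rfl⟩|⟨rfl,rfl⟩|⟨rfl,rfl⟩|⟨rfl,rfl⟩|⟨rfl,rfl⟩|⟨rfl,rfl⟩|⟨rfl,rfl⟩|⟨rfl,rfl⟩ <;> decide

-- every priority entry has its own index as rank
set_option maxHeartbeats 2000000 in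
lemma pvRank_getElem (k : Nat) (hk : k < pvP.length) (p : String) (hp : pvP[k]? = some p) :
    pvRank.get? p = some (k : Int) := by
  have hk15 : k < 15 := by simpa [pvP] using hk
  interval_cases k <;>
    simp only [pvP, List.getElem?_cons_zero, List.getElem?_cons_succ, Option.some.injEq] at hp <;>
    (subst hp; decide)

lemma pvStep_none (best : Option (Int × String)) (q : String)
    (h : pvStep best q = none) : best = none ∧ pvRank.get? q = none := by
  cases best with
  | none =>
    cases hq : pvRank.get? q with
    | none => exact ⟨rfl, rfl⟩
    | some s0 => simp only [pvStep, hq] at h; simp at h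
  | some b =>
    obtain ⟨br, bp⟩ := b
    cases hq : pvRank.get? q with
    | none => simp only [pvStep, hq] at h; simp at h
    | some s0 =>
      simp only [pvStep, hq] at h
      split_ifs at h

lemma pvStep_some (best : Option (Int × String)) (q : String) (r : Int) (p : String)
    (h : pvStep best q = some (r, p)) :
    ((p = q ∧ pvRank.get? q = some r) ∨ best = some (r, p)) ∧
    (∀ s, pvRank.get? q = some s → r ≤ s) ∧
    (∀ r' p', best = some (r', p') → r ≤ r') := by
  cases best with
  | none =>
    cases hq : pvRank.get? q with
    | none =>
      simp only [pvStep, hq] at h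
      simp at h
    | some s0 =>
      simp only [pvStep, hq] at h
      cases h
      refine ⟨Or.inl ⟨rfl, rfl⟩, ?_, ?_⟩
      · intro s hs; cases hs; exact le_rfl
      · intro r' p' hb; simp at hb
  | some b =>
    obtain ⟨br, bp⟩ := b
    cases hq : pvRank.get? q with
    | none =>
      simp only [pvStep, hq] at h
      refine ⟨Or.inr h, ?_, ?_⟩
      · intro s hs; simp at hs
      · intro r' p' hb
        have h2 := h.symm.trans hb
        cases h2; exact le_rfl
    | some s0 =>
      simp only [pvStep, hq] at h
      split_ifs at h with hlt
      · cases h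
        refine ⟨Or.inl ⟨rfl, rfl⟩, ?_, ?_⟩
        · intro s hs; cases hs; exact le_rfl
        · intro r' p' hb; cases hb; omega
      · cases h
        refine ⟨Or.inr rfl, ?_, ?_⟩
        · intro s hs; cases hs; omega
        · intro r' p' hb; cases hb; exact le_rfl

lemma pvStep_isSome (best : Option (Int × String)) (q : String)
    (h : best.isSome) : (pvStep best q).isSome := by
  cases best with
  | none => cases h
  | some b =>
    obtain ⟨br, bp⟩ := b
    cases hq : pvRank.get? q with
    | none => simp only [pvStep, hq]; rfl
    | some s0 =>
      simp only [pvStep, hq]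
      split_ifs <;> rfl

lemma pvStep_isSome_of_rank (best : Option (Int × String)) (q : String) (s : Int)
    (hs : pvRank.get? q = some s) : (pvStep best q).isSome := by
  cases best with
  | none => simp [pvStep, hs]
  | some b =>
    obtain ⟨br, bp⟩ := b
    simp only [pvStep, hs]
    split_ifs <;> rfl

lemma pvFold_none (parts : List String) (best : Option (Int × String))
    (h : parts.foldl pvStep best = none) :
    best = none ∧ ∀ q ∈ parts, pvRank.get? q = none := by
  induction parts generalizing best with
  | nil =>
    simp only [List.foldl_nil] at h
    exact ⟨h, by intro q hq; cases hq⟩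
  | cons q rest ih =>
    simp only [List.foldl_cons] at h
    obtain ⟨h1, h2⟩ := ih (pvStep best q) h
    obtain ⟨hb, hq⟩ := pvStep_none best q h1
    refine ⟨hb, ?_⟩
    intro x hx
    rcases List.mem_cons.mp hx with rfl | hx'
    · exact hq
    · exact h2 x hx'

lemma pvFold_some (parts : List String) (best : Option (Int × String)) (r : Int) (p : String)
    (hinv : ∀ r' p', best = some (r', p') → pvRank.get? p' = some r')
    (h : parts.foldl pvStep best = some (r, p)) :
    (pvRank.get? p = some r ∧ (p ∈ parts ∨ best = some (r, p))) ∧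
    (∀ q ∈ parts, ∀ s, pvRank.get? q = some s → r ≤ s) ∧
    (∀ r' p', best = some (r', p') → r ≤ r') := by
  induction parts generalizing best with
  | nil =>
    simp only [List.foldl_nil] at h
    refine ⟨⟨hinv r p h, Or.inr h⟩, ?_, ?_⟩
    · intro q hq; cases hq
    · intro r' p' hb
      have h2 := h.symm.trans hb
      cases h2; exact le_rfl
  | cons q rest ih =>
    simp only [List.foldl_cons] at h
    have hinv' : ∀ r' p', pvStep best q = some (r', p') → pvRank.get? p' = some r' := by
      intro r' p' hs
      rcases (pvStep_some best q r' p' hs).1 with ⟨rfl, hq⟩ | hbest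
      · exact hq
      · exact hinv r' p' hbest
    obtain ⟨⟨hrk, hloc⟩, hmin, hdec⟩ := ih (pvStep best q) hinv' h
    refine ⟨⟨hrk, ?_⟩, ?_, ?_⟩
    · rcases hloc with hmem | hbest'
      · exact Or.inl (List.mem_cons_of_mem _ hmem)
      · rcases (pvStep_some best q r p hbest').1 with ⟨rfl, _⟩ | hbest
        · exact Or.inl List.mem_cons_self
        · exact Or.inr hbest
    · intro q' hq' s hs
      rcases List.mem_cons.mp hq' with rfl | hmem
      · obtain ⟨⟨r0, p0⟩, hb'⟩ :=
          Option.isSome_iff_exists.mp (pvStep_isSome_of_rank best q' s hs)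
        have h1 := hdec r0 p0 hb'
        have h2 := (pvStep_some best q' r0 p0 hb').2.1 s hs
        omega
      · exact hmin q' hmem s hs
    · intro r' p' hb
      obtain ⟨⟨r0, p0⟩, hb'⟩ :=
        Option.isSome_iff_exists.mp (pvStep_isSome best q (by rw [hb]; rfl))
      have h1 := hdec r0 p0 hb'
      have h2 := (pvStep_some best q r0 p0 hb').2.2 r' p' hb
      omega

-- split on a non-empty separator never yields the empty list
lemma pvSplitOn_go_ne_nil (sep : List Char) (fuel : Nat) (l cur : List Char)
    (acc : List (List Char)) : PySem.Chars.splitOn.go sep fuel l cur acc ≠ [] := by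
  induction fuel generalizing l cur acc with
  | zero => simp [PySem.Chars.splitOn.go]
  | succ n ih =>
    cases l with
    | nil => simp [PySem.Chars.splitOn.go]
    | cons c rest =>
      simp only [PySem.Chars.splitOn.go]
      split
      · exact ih _ _ _
      · exact ih _ _ _

lemma pvParts_ne_nil (s : String) :
    (PySem.Str.split? s ":").getD [] ≠ [] := by
  intro hnil
  have hmap := PySem.Str.split?_map s ":"
  cases hsp : PySem.Str.split? s ":" with
  | none => rw [hsp] at hmap; simp [PySem.Chars.split?] at hmap
  | some l =>
    rw [hsp] at hnil
    simp only [Option.getD_some] at hnil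
    subst hnil
    rw [hsp] at hmap
    simp only [Option.map_some, List.map_nil, PySem.Chars.split?] at hmap
    rw [if_neg (by decide)] at hmap
    have hgo := pvSplitOn_go_ne_nil (":".toList) (s.toList.length + 1) s.toList [] []
    rw [PySem.Chars.splitOn] at hmap
    exact hgo (Option.some_injective _ hmap).symm

-- the fold of B picks exactly the first priority entry present among the parts
lemma pvFold_eq_find (parts : List String) :
    (parts.foldl pvStep none).map Prod.snd = pvP.find? (fun p => parts.contains p) := by
  cases hF : parts.foldl pvStep none with
  | none =>
    obtain ⟨-, hall⟩ := pvFold_none parts none hF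
    have hfind : pvP.find? (fun p => parts.contains p) = none := by
      rw [List.find?_eq_none]
      intro p hp hc
      obtain ⟨k, hk, rfl⟩ := List.mem_iff_getElem.mp hp
      have h1 := hall _ (by simpa using hc)
      have h2 := pvRank_getElem k hk _ (List.getElem?_eq_getElem hk)
      rw [h1] at h2
      simp at h2
    rw [hfind]; rfl
  | some b =>
    obtain ⟨r, p⟩ := b
    obtain ⟨⟨hrk, hloc⟩, hmin, -⟩ :=
      pvFold_some parts none r p (by intro r' p' h'; cases h') hF
    have hp : p ∈ parts := by
      rcases hloc with h' | h'
      · exact h'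
      · cases h'
    obtain ⟨hr0, hrlen, hget⟩ := pvRank_decode p r hrk
    have hfind : pvP.find? (fun p => parts.contains p) = some p := by
      rw [List.find?_eq_some_iff_getElem]
      refine ⟨by simpa using hp, r.toNat, hrlen, ?_, ?_⟩
      · have h3 := (List.getElem?_eq_getElem hrlen).symm.trans hget
        exact Option.some.inj h3
      · intro j hj
        by_contra hcon
        have hjmem : pvP[j] ∈ parts := by
          simp only [Bool.not_eq_eq_eq_not, Bool.not_true, Bool.not_eq_false] at hcon
          simpa using hcon
        have hjr : j < pvP.length := by omega
        have h4 := hmin _ hjmem (j : Int) (pvRank_getElem j hjr _ (List.getElem?_eq_getElem hjr))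
        omega
    rw [hfind]; rfl

set_option maxHeartbeats 1000000 in
lemma pvMain (chain : String) : highest_protocol_py chain = highest_protocol_py_alt chain := by
  have hne := pvParts_ne_nil (PySem.Str.lower chain)
  have hA : highest_protocol_py chain =
      (match pvP.find? (fun p => ((PySem.Str.split? (PySem.Str.lower chain) ":").getD []).contains p) with
       | some p => PySem.Str.upper p
       | none =>
         if ((PySem.Str.split? (PySem.Str.lower chain) ":").getD []).isEmpty then "UNKNOWN"
         else PySem.Str.upper (PySem.List.pyGetD ((PySem.Str.split? (PySem.Str.lower chain) ":").getD []) (-1) "")) := rfl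
  have hB : highest_protocol_py_alt chain =
      (match ((PySem.Str.split? (PySem.Str.lower chain) ":").getD []).foldl pvStep none with
       | some b => PySem.Str.upper b.2
       | none => PySem.Str.upper (PySem.List.pyGetD ((PySem.Str.split? (PySem.Str.lower chain) ":").getD []) (-1) "")) := rfl
  rw [hA, hB]
  have hff := pvFold_eq_find ((PySem.Str.split? (PySem.Str.lower chain) ":").getD [])
  have hie : ((PySem.Str.split? (PySem.Str.lower chain) ":").getD []).isEmpty = false := by
    cases hcase : ((PySem.Str.split? (PySem.Str.lower chain) ":").getD []) with
    | nil => exact absurd hcase hne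
    | cons a l => rfl
  cases hF : ((PySem.Str.split? (PySem.Str.lower chain) ":").getD []).foldl pvStep none with
  | none =>
    rw [hF] at hff
    have hfind : pvP.find? (fun p => ((PySem.Str.split? (PySem.Str.lower chain) ":").getD []).contains p) = none := by
      simpa using hff.symm
    rw [hfind]
    simp [hie]
  | some b =>
    obtain ⟨r, p⟩ := b
    rw [hF] at hff
    have hfind : pvP.find? (fun p => ((PySem.Str.split? (PySem.Str.lower chain) ":").getD []).contains p) = some p := by
      simpa using hff.symm
    rw [hfind]

-- ===== VERDICT (by name: the statement is the Claim_ definition above) =====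
theorem highest_protocol_py_spec : Claim_equal_highest_protocol_py := by
  intro chain _
  unfold Spec_highest_protocol_py
  exact (pvMain chain)
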